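-- pv_equiv track=rewrite | github.com/msg555/tplbuild | tplbuild/utils.py | extract_command_flags
-- ===== SOURCE A (Python) =====
-- from typing import Any, Dict, Iterable, List, Sequence, Tuple
--
-- def extract_command_flags(line: str) -> Tuple[str, Dict[str, str]]:
--     """
--     Some Dockerfile commands support flags in the form "--name=value" at the start of
--     the command. This extracts the commands with those flags removed and returns a
--     mapping of the extracted flags.
--
--     Notes:
--         As far as I know there is no escaping layer here. Names that contain spaces
--         or equal signs cannot be represented as flag names or values.
--
--     Returns: (line, flags) tuple
--         line: The line with the flags removed.
--         flags: The mapping of flag names to flag values that was extracted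
--     """
--
--     def _skip_ws(pos: int) -> int:
--         while pos < len(line) and line[pos].isspace():
--             pos += 1
--         return pos
--
--     pos = _skip_ws(0)
--     flags = {}
--     while pos + 1 < len(line) and line[pos : pos + 2] == "--":
--         space = line.find(" ", pos + 2)
--         if space == -1:
--             space = len(line)
--
--         parts = line[pos + 2 : space].split("=", 1)
--         if len(parts) == 2:
--             flags[parts[0]] = parts[1]
--         else:
--             flags[parts[0]] = ""
--         pos = _skip_ws(space)
--
--     if not flags:
--         return line, {}
--     return line[pos:], flags
-- ===== SOURCE B (Python) =====
-- def extract_command_flags(line):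
--     """Suffix-consuming rewrite: peel leading flag tokens with partition/lstrip
--     instead of index arithmetic with find/slices."""
--     flags = {}
--     rest = line.lstrip()
--     while rest.startswith("--"):
--         tok, _, rest = rest[2:].partition(" ")
--         name, _, value = tok.partition("=")
--         flags[name] = value
--         rest = rest.lstrip()
--     if not flags:
--         return line, {}
--     return rest, flags
-- ===== Notes on version B (the rewrite author's own statement) =====
-- stated objective: simpler
-- what changed: Replaces A's index arithmetic (explicit position cursor, find with -1 sentinel, slicing, split with maxsplit, a nested skip-whitespace helper) by suffix consumption: lstrip the line once, then repeatedly peel one leading flag token at a time with partition/lstrip, so no positions or sentinels are tracked at all.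
import Mathlib
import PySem

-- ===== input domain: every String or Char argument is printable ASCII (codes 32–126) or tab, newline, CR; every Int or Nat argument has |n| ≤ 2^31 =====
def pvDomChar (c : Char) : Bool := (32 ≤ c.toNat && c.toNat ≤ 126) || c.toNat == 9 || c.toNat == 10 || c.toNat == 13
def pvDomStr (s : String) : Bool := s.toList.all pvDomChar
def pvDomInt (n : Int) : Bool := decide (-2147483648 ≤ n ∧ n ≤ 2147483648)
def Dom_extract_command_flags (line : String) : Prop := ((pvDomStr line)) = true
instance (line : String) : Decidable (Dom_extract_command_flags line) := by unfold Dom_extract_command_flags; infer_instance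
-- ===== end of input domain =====

-- B rewrites A's index-cursor scan (find with -1 sentinel, slices, split) as suffix
-- consumption with startswith/partition/lstrip; objective: simpler. A is total; equal on all inputs.

-- ===== PORT A =====
-- A's inner helper `_skip_ws`: while pos < len(line) and line[pos].isspace(): pos += 1
def pvSkipWs (s : List Char) (pos : Nat) : Nat :=
  if _h : pos < s.length then
    if PySem.Chars.isspace s[pos] then pvSkipWs s (pos + 1) else pos
  else pos
termination_by s.length - pos

-- bounds cited by pvLoopA's termination proof
theorem pvSkipWs_ge (s : List Char) (pos : Nat) : pos ≤ pvSkipWs s pos := by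
  induction pos using pvSkipWs.induct s with
  | case1 pos h hsp ih => rw [pvSkipWs]; simp [h, hsp]; omega
  | case2 pos h hsp => rw [pvSkipWs]; simp [h, hsp]
  | case3 pos h => rw [pvSkipWs]; simp [h]

-- A's `space = line.find(" ", pos + 2); if space == -1: space = len(line)`
def pvSpace (s : List Char) (pos : Nat) : Nat :=
  if PySem.Chars.findFrom s [' '] ((pos + 2 : Nat) : Int) none = -1 then s.length
  else (PySem.Chars.findFrom s [' '] ((pos + 2 : Nat) : Int) none).toNat

theorem pvSpace_ge (s : List Char) (pos : Nat) (h2 : pos + 2 ≤ s.length) : pos + 2 ≤ pvSpace s pos := by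
  unfold pvSpace
  split
  · omega
  · rename_i hne
    have := (PySem.Chars.findFrom_natCast_spec s [' '] (pos + 2) h2 hne).1
    omega

-- A's main while loop over (pos, flags)
def pvLoopA (s : List Char) (pos : Nat) (flags : PySem.Dict String String) :
    Nat × PySem.Dict String String :=
  if h : pos + 1 < s.length ∧
      PySem.List.slice s (some (pos : Int)) (some ((pos + 2 : Nat) : Int)) = ['-', '-'] then
    let parts := PySem.Chars.splitOnMax
      (PySem.List.slice s (some ((pos + 2 : Nat) : Int)) (some ((pvSpace s pos : Nat) : Int))) ['='] 1
    let flags' := if parts.length = 2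
      then flags.insert (String.ofList (parts.getD 0 [])) (String.ofList (parts.getD 1 []))
      else flags.insert (String.ofList (parts.getD 0 [])) ""
    pvLoopA s (pvSkipWs s (pvSpace s pos)) flags'
  else (pos, flags)
termination_by s.length - pos
decreasing_by
  have h2 : pos + 2 ≤ s.length := by omega
  have hg := pvSpace_ge s pos h2
  have := pvSkipWs_ge s (pvSpace s pos)
  omega

def extract_command_flags (line : String) : String × (List (String × String)) :=
  let s := line.toList
  let r := pvLoopA s (pvSkipWs s 0) PySem.Dict.empty
  if r.2.items = [] then (line, [])
  else (String.ofList (PySem.List.slice s (some ((r.1 : Nat) : Int)) none), r.2.items)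

-- ===== PORT B =====
-- Source B consumes the remaining suffix directly: startswith/partition/lstrip, no positions.
-- `x.partition(c)` for a one-char separator is ported by hand, exactly:
-- before = takeWhile (· ≠ c), after = dropWhile (· ≠ c) minus the separator (drop 1).
def pvLoopB (rest : List Char) (flags : PySem.Dict String String) :
    List Char × PySem.Dict String String :=
  if h : rest.take 2 = ['-', '-'] then
    let tok := (rest.drop 2).takeWhile (· ≠ ' ')
    let rest1 := ((rest.drop 2).dropWhile (· ≠ ' ')).drop 1
    pvLoopB (PySem.Chars.lstrip rest1)
      (flags.insert (String.ofList (tok.takeWhile (· ≠ '=')))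
                    (String.ofList ((tok.dropWhile (· ≠ '=')).drop 1)))
  else (rest, flags)
termination_by rest.length
decreasing_by
  have hlen : 2 ≤ rest.length := by
    have := congrArg List.length h
    simp at this
    omega
  calc (PySem.Chars.lstrip (((rest.drop 2).dropWhile (· ≠ ' ')).drop 1)).length
      ≤ (((rest.drop 2).dropWhile (· ≠ ' ')).drop 1).length := by
        simpa [PySem.Chars.lstrip] using
          List.length_dropWhile_le PySem.Chars.isspace (((rest.drop 2).dropWhile (· ≠ ' ')).drop 1)
    _ ≤ ((rest.drop 2).dropWhile (· ≠ ' ')).length := by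
        simp
    _ ≤ (rest.drop 2).length := List.length_dropWhile_le _ _
    _ < rest.length := by simp; omega

def extract_command_flags_alt (line : String) : String × (List (String × String)) :=
  let r := pvLoopB (PySem.Chars.lstrip line.toList) PySem.Dict.empty
  if r.2.items = [] then (line, [])
  else (String.ofList r.1, r.2.items)

-- ===== PRECONDITION & SPEC =====
def Spec_extract_command_flags (line : String) (out : String × (List (String × String))) : Prop := out = extract_command_flags_alt line
instance (line : String) (out : String × (List (String × String))) : Decidable (Spec_extract_command_flags line out) := by unfold Spec_extract_command_flags; infer_instance

-- ===== CLAIM (what is proved, stated in full; the proofs are below) =====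
def Claim_equal_extract_command_flags : Prop := ∀ (line : String), Dom_extract_command_flags line → Spec_extract_command_flags line (extract_command_flags line)

-- ===== LEMMAS AND PROOFS =====

theorem pvSkipWs_le (s : List Char) (pos : Nat) : pos ≤ s.length → pvSkipWs s pos ≤ s.length := by
  induction pos using pvSkipWs.induct s with
  | case1 pos h hsp ih => intro _; rw [pvSkipWs]; simp [h, hsp]; exact ih (by omega)
  | case2 pos h hsp => intro _; rw [pvSkipWs]; simp [h, hsp]; omega
  | case3 pos h => intro h0; rw [pvSkipWs]; simpa [h] using h0

theorem pvSpace_le (s : List Char) (pos : Nat) (h2 : pos + 2 ≤ s.length) : pvSpace s pos ≤ s.length := by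
  unfold pvSpace
  split
  · exact le_rfl
  · rename_i hne
    have hpre := (PySem.Chars.findFrom_natCast_spec s [' '] (pos + 2) h2 hne).2.1
    have hl := hpre.length_le
    simp only [List.length_drop, List.length_cons, List.length_nil] at hl
    omega

-- dropping up to the skipped-whitespace position IS dropWhile isspace
theorem pvSkipWs_drop (s : List Char) (pos : Nat) : pos ≤ s.length →
    s.drop (pvSkipWs s pos) = (s.drop pos).dropWhile PySem.Chars.isspace := by
  induction pos using pvSkipWs.induct s with
  | case1 pos h hsp ih =>
    intro _
    rw [pvSkipWs, dif_pos h, if_pos hsp]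
    rw [ih (by omega), List.drop_eq_getElem_cons h, List.dropWhile_cons_of_pos hsp]
  | case2 pos h hsp =>
    intro _
    rw [pvSkipWs, dif_pos h, if_neg hsp]
    rw [List.drop_eq_getElem_cons h, List.dropWhile_cons_of_neg hsp, ← List.drop_eq_getElem_cons h]
  | case3 pos h =>
    intro _
    rw [pvSkipWs, dif_neg h]
    rw [List.drop_of_length_le (by omega), List.dropWhile_nil]

-- `find` for a one-char needle, as takeWhile length


-- `split(sep, 1)` for a one-char separator, as partition



theorem pv_find_go_single (c : Char) (t : List Char) (k : Nat) :
    PySem.Chars.find.go [c] t k =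
      if c ∈ t then ((k : Int) + (t.takeWhile (· ≠ c)).length) else -1 := by
  induction t generalizing k with
  | nil => simp [PySem.Chars.find.go]
  | cons a rest ih =>
    by_cases hac : a = c
    · subst hac
      simp [PySem.Chars.find.go, List.isPrefixOf]
    · rw [PySem.Chars.find.go]
      have hpre : ¬ ([c].isPrefixOf (a :: rest) = true) := by
        simp [List.isPrefixOf]
        exact fun hh => absurd hh.symm hac
      simp only [hpre, ih]
      by_cases hm : c ∈ rest
      · simp [hm, Ne.symm, fun h => hac h]
        ring
      · simp [hm, fun h => hac h]
        intro h
        exact absurd h.symm hac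
theorem pv_find_single (t : List Char) (c : Char) :
    PySem.Chars.find t [c] =
      if c ∈ t then ((t.takeWhile (· ≠ c)).length : Int) else -1 := by
  rw [PySem.Chars.find, pv_find_go_single]
  simp

theorem pv_split_go_zero (c : Char) (f : Nat) (l cur : List Char) (acc : List (List Char)) :
    PySem.Chars.splitOnMax.go [c] f 0 l cur acc = ((cur.reverse ++ l) :: acc).reverse := by
  cases f with
  | zero => rw [PySem.Chars.splitOnMax.go]
  | succ f =>
    cases l with
    | nil => rw [PySem.Chars.splitOnMax.go]; simp; omega
    | cons a rest => rw [PySem.Chars.splitOnMax.go]; simp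

theorem pv_split_go_single (c : Char) (t : List Char) (fuel : Nat) (cur : List Char)
    (acc : List (List Char)) : t.length ≤ fuel →
    PySem.Chars.splitOnMax.go [c] fuel 1 t cur acc =
      if c ∈ t then acc.reverse ++ [cur.reverse ++ t.takeWhile (· ≠ c), (t.dropWhile (· ≠ c)).drop 1]
      else acc.reverse ++ [cur.reverse ++ t] := by
  induction t generalizing fuel cur acc with
  | nil =>
    intro _
    cases fuel with
    | zero => rw [PySem.Chars.splitOnMax.go]; simp
    | succ f => rw [PySem.Chars.splitOnMax.go]; simp; omega
  | cons a rest ih =>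
    intro hf
    obtain ⟨f, rfl⟩ : ∃ f, fuel = f + 1 := ⟨fuel - 1, by simp at hf; omega⟩
    rw [PySem.Chars.splitOnMax.go]
    by_cases hac : a = c
    · subst hac
      have hpre : [a].isPrefixOf (a :: rest) = true := by simp [List.isPrefixOf]
      simp only [hpre, if_true, if_neg (by omega : ¬ (1:Nat) = 0)]
      rw [pv_split_go_zero]
      simp
    · have hpre : ¬ ([c].isPrefixOf (a :: rest) = true) := by
        simp [List.isPrefixOf]
        exact fun hh => absurd hh.symm hac
      simp only [hpre, if_neg (by omega : ¬ (1:Nat) = 0), Bool.false_eq_true, if_false]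
      rw [ih f (a :: cur) acc (by simp at hf ⊢; omega)]
      by_cases hm : c ∈ rest
      · simp [hm, Ne.symm, fun h => hac h]
      · simp [hm, fun h => hac h]
        exact fun h => hac h.symm

theorem pv_split_single (t : List Char) (c : Char) :
    PySem.Chars.splitOnMax t [c] 1 =
      if c ∈ t then [t.takeWhile (· ≠ c), (t.dropWhile (· ≠ c)).drop 1] else [t] := by
  rw [PySem.Chars.splitOnMax]
  rw [if_neg (by omega : ¬ (1:Int) < 0)]
  have : (1:Int).toNat = 1 := rfl
  rw [this, pv_split_go_single c t (t.length + 1) [] [] (by omega)]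
  split <;> simp

-- A's computed `space`, expressed on the suffix
theorem pvSpace_eq (s : List Char) (pos : Nat) (h2 : pos + 2 ≤ s.length) :
    pvSpace s pos =
      if ' ' ∈ s.drop (pos + 2) then pos + 2 + ((s.drop (pos + 2)).takeWhile (· ≠ ' ')).length
      else s.length := by
  unfold pvSpace
  rw [PySem.Chars.findFrom_natCast s [' '] (pos + 2) h2, pv_find_single]
  by_cases hm : ' ' ∈ s.drop (pos + 2)
  · rw [if_pos hm, if_neg (by omega), if_neg (by omega), if_pos hm]
    omega
  · rw [if_neg hm, if_pos rfl, if_pos rfl, if_neg hm]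

theorem pv_dropWhile_eq_drop (p : Char → Bool) (l : List Char) :
    l.dropWhile p = l.drop (l.takeWhile p).length := by
  induction l with
  | nil => rfl
  | cons a rest ih =>
    by_cases hp : p a
    · simp [List.takeWhile_cons, hp, ih]
    · simp [List.takeWhile_cons, hp]
theorem pv_take_takeWhile (p : Char → Bool) (l : List Char) :
    l.take (l.takeWhile p).length = l.takeWhile p := by
  induction l with
  | nil => rfl
  | cons a rest ih =>
    by_cases hp : p a
    · simp [hp, ih]
    · simp [hp]
theorem pv_dropWhile_ne_cons (t : List Char) (c : Char) (h : c ∈ t) :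
    t.dropWhile (· ≠ c) = c :: (t.dropWhile (· ≠ c)).drop 1 := by
  induction t with
  | nil => simp at h
  | cons a rest ih =>
    by_cases hac : a = c
    · subst hac; simp
    · have hm : c ∈ rest := by simp at h; tauto
      simp [fun hh => hac hh]
      simpa using ih hm

-- the main loop correspondence
theorem pvLoop_eq (s : List Char) (pos : Nat) (flags : PySem.Dict String String) :
    pos ≤ s.length →
    pvLoopB (s.drop pos) flags = (s.drop (pvLoopA s pos flags).1, (pvLoopA s pos flags).2) := by
  induction pos, flags using pvLoopA.induct s with
  | case1 pos flags h parts flags' ih =>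
    intro hle
    obtain ⟨h1, h2⟩ := h
    have hp2 : pos + 2 ≤ s.length := by omega
    have hB : (s.drop pos).take 2 = ['-', '-'] := by
      rw [PySem.List.slice_natCast, show pos + 2 - pos = 2 from by omega] at h2
      exact h2
    rw [pvLoopA, dif_pos ⟨h1, h2⟩, pvLoopB, dif_pos hB]
    have hdd : (s.drop pos).drop 2 = s.drop (pos + 2) := by
      rw [List.drop_drop]
    have htok : PySem.List.slice s (some ((pos + 2 : Nat) : Int)) (some ((pvSpace s pos : Nat) : Int))
        = (s.drop (pos + 2)).takeWhile (· ≠ ' ') := by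
      rw [pvSpace_eq s pos hp2]
      by_cases hm : ' ' ∈ s.drop (pos + 2)
      · rw [if_pos hm, PySem.List.slice_natCast,
          show pos + 2 + ((s.drop (pos + 2)).takeWhile (· ≠ ' ')).length - (pos + 2)
            = ((s.drop (pos + 2)).takeWhile (· ≠ ' ')).length from by omega]
        exact pv_take_takeWhile _ _
      · rw [if_neg hm, PySem.List.slice_natCast]
        rw [List.take_of_length_le (by simp)]
        exact (List.takeWhile_eq_self_iff.mpr (by
          intro a ha
          simp only [decide_eq_true_eq]
          exact fun hh => hm (hh ▸ ha))).symm
    have hrest : PySem.Chars.lstrip (((s.drop (pos + 2)).dropWhile (· ≠ ' ')).drop 1)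
        = s.drop (pvSkipWs s (pvSpace s pos)) := by
      rw [pvSkipWs_drop s (pvSpace s pos) (pvSpace_le s pos hp2), pvSpace_eq s pos hp2]
      by_cases hm : ' ' ∈ s.drop (pos + 2)
      · rw [if_pos hm, show pos + 2 + ((s.drop (pos + 2)).takeWhile (· ≠ ' ')).length
            = pos + 2 + ((s.drop (pos + 2)).takeWhile (· ≠ ' ')).length from rfl]
        rw [show s.drop (pos + 2 + ((s.drop (pos + 2)).takeWhile (· ≠ ' ')).length)
            = (s.drop (pos + 2)).drop ((s.drop (pos + 2)).takeWhile (· ≠ ' ')).length from by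
          rw [List.drop_drop]]
        rw [← pv_dropWhile_eq_drop]
        conv_rhs => rw [pv_dropWhile_ne_cons (s.drop (pos + 2)) ' ' hm]
        rw [List.dropWhile_cons_of_pos (by decide)]
        simp [PySem.Chars.lstrip]
      · rw [if_neg hm, List.drop_of_length_le le_rfl]
        have hnil : (s.drop (pos + 2)).dropWhile (· ≠ ' ') = [] :=
          List.dropWhile_eq_nil_iff.mpr (by
            intro a ha
            simp only [decide_eq_true_eq]
            exact fun hh => hm (hh ▸ ha))
        simp only [ne_eq, decide_not] at hnil
        simp [PySem.Chars.lstrip, hnil]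
    have hih := ih (pvSkipWs_le s (pvSpace s pos) (pvSpace_le s pos hp2))
    simp only [hdd, htok, hrest, pv_split_single]
    simp only [flags', parts, htok, pv_split_single] at hih
    by_cases he : '=' ∈ (s.drop (pos + 2)).takeWhile (· ≠ ' ')
    · rw [if_pos he] at hih
      simp at hih
      simp only [ne_eq, decide_not] at he
      simpa [he] using hih
    · rw [if_neg he] at hih
      simp at hih
      have htw : ((s.drop (pos + 2)).takeWhile (· ≠ ' ')).takeWhile (· ≠ '=')
          = (s.drop (pos + 2)).takeWhile (· ≠ ' ') :=
        List.takeWhile_eq_self_iff.mpr (by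
          intro a ha
          simp only [decide_eq_true_eq]
          exact fun hh => he (hh ▸ ha))
      have hdw : ((s.drop (pos + 2)).takeWhile (· ≠ ' ')).dropWhile (· ≠ '=') = [] :=
        List.dropWhile_eq_nil_iff.mpr (by
          intro a ha
          simp only [decide_eq_true_eq]
          exact fun hh => he (hh ▸ ha))
      simp only [ne_eq, decide_not] at he htw hdw
      simpa [he, htw, hdw] using hih
  | case2 pos flags h =>
    intro hle
    have hBn : ¬ ((s.drop pos).take 2 = ['-', '-']) := by
      intro hB
      apply h
      have hlen : 2 ≤ s.length - pos := by
        have := congrArg List.length hB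
        simp at this
        omega
      refine ⟨by omega, ?_⟩
      rw [PySem.List.slice_natCast, show pos + 2 - pos = 2 from by omega]
      exact hB
    rw [pvLoopA, dif_neg h, pvLoopB, dif_neg hBn]

-- ===== VERDICT (by name: the statement is the Claim_ definition above) =====
theorem extract_command_flags_spec : Claim_equal_extract_command_flags := by
  intro line _
  unfold Spec_extract_command_flags extract_command_flags extract_command_flags_alt
  have h0 := pvSkipWs_le line.toList 0 (by omega)
  have hd : PySem.Chars.lstrip line.toList = line.toList.drop (pvSkipWs line.toList 0) := by
    rw [pvSkipWs_drop line.toList 0 (by omega)]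
    simp [PySem.Chars.lstrip]
  rw [hd, pvLoop_eq line.toList (pvSkipWs line.toList 0) PySem.Dict.empty h0]
  simp only [PySem.List.slice_from_natCast]
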